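-- pv_equiv track=rewrite | github.com/WilliamYe6/Game-Thirteen-Card-Game | arrangement.py | equal_or_less_occurrences
-- ===== SOURCE A (Python) =====
-- from collections import Counter
-- from itertools import chain, combinations
--
-- occurrences = {}
--
-- element_counts = {}
--
-- nested_tuple_counts = {}
--
-- def equal_or_less_occurrences(elements, nested_tuple):
--     if (elements, nested_tuple) not in occurrences:
--         result = True
--
--         if elements not in element_counts:
--             e_cts = Counter(elements)
--             element_counts[elements] = e_cts
--         else:
--             e_cts = element_counts[elements]
--         if nested_tuple not in nested_tuple_counts:
--             nt_cts = Counter(chain.from_iterable(nested_tuple))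
--             nested_tuple_counts[nested_tuple] = nt_cts
--         else:
--             nt_cts = nested_tuple_counts[nested_tuple]
--
--         if any(nt_cts[x] > e_cts[x] for x in elements):
--             result = False
--
--         occurrences[(elements, nested_tuple)] = result
--     return occurrences[(elements, nested_tuple)]
-- ===== SOURCE B (Python) =====
-- def equal_or_less_occurrences(elements, nested_tuple):
--     # Multiset-subtraction: consume one copy of elements while scanning the
--     # nested values; fail as soon as a value of elements is over-drawn.
--     pool = list(elements)
--     for inner in nested_tuple:
--         for v in inner:
--             if v in pool:
--                 pool.remove(v)
--             elif v in elements: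
--                 return False
--     return True
-- ===== Notes on version B (the rewrite author's own statement) =====
-- stated objective: alternative
-- what changed: Replaced the two-Counter comparison with a destructive multiset-subtraction scan: a mutable copy of elements is consumed one occurrence at a time while walking the nested values, returning False early the moment some value of elements is over-drawn; no counts are ever computed.
import Mathlib
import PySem

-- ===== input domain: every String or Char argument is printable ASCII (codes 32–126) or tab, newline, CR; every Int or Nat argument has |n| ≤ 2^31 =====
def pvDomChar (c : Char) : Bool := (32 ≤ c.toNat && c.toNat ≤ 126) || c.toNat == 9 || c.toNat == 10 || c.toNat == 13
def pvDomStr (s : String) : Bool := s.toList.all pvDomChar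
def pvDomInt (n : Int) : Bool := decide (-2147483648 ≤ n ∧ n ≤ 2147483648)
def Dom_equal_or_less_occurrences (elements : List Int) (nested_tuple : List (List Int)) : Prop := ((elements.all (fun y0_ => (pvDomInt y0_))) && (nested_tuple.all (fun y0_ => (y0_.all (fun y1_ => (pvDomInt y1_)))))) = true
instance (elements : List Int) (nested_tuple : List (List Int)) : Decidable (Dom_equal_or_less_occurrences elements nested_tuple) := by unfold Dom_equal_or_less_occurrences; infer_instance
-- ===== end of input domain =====

-- ===== PORT A =====
-- Port of A. The module-level memo dicts only cache results and never change the
-- returned value, so the port computes the body directly: two Counters, then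
-- `any` over elements. (Counter lookup of a missing key is 0 = getD _ 0.)
def equal_or_less_occurrences (elements : List Int) (nested_tuple : List (List Int)) : Bool :=
  let e_cts := PySem.Dict.counter elements
  let nt_cts := PySem.Dict.counter nested_tuple.flatten
  let result := true
  let result := if elements.any (fun x => nt_cts.getD x 0 > e_cts.getD x 0) then false else result
  result

-- ===== PORT B =====
-- Port of B: destructive multiset subtraction. The state is the remaining pool
-- (`some pool`) or `none` once B has returned False; `pool.remove(v)` removes
-- the first occurrence (PySem.List.remove?, guarded by the `v in pool` test).
def pvStepB (elements : List Int) (st : Option (List Int)) (v : Int) : Option (List Int) :=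
  match st with
  | none => none
  | some pool =>
    if pool.contains v then some ((PySem.List.remove? pool v).getD pool)
    else if elements.contains v then none
    else some pool

def equal_or_less_occurrences_alt (elements : List Int) (nested_tuple : List (List Int)) : Bool :=
  (nested_tuple.foldl (fun st inner => inner.foldl (pvStepB elements) st) (some elements)).isSome

-- ===== PRECONDITION & SPEC =====
def Spec_equal_or_less_occurrences (elements : List Int) (nested_tuple : List (List Int)) (out : Bool) : Prop := out = equal_or_less_occurrences_alt elements nested_tuple
instance (elements : List Int) (nested_tuple : List (List Int)) (out : Bool) : Decidable (Spec_equal_or_less_occurrences elements nested_tuple out) := by unfold Spec_equal_or_less_occurrences; infer_instance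

-- ===== CLAIM (what is proved, stated in full; the proofs are below) =====
def Claim_equal_equal_or_less_occurrences : Prop := ∀ (elements : List Int) (nested_tuple : List (List Int)), Dom_equal_or_less_occurrences elements nested_tuple → Spec_equal_or_less_occurrences elements nested_tuple (equal_or_less_occurrences elements nested_tuple)

-- ===== LEMMAS AND PROOFS =====

-- The nested fold of B over the inner lists equals one fold over the flattening.
theorem foldB_flatten (elements : List Int) (nt : List (List Int)) (st : Option (List Int)) :
    nt.foldl (fun st inner => inner.foldl (pvStepB elements) st) st
      = nt.flatten.foldl (pvStepB elements) st := by
  induction nt generalizing st with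
  | nil => rfl
  | cons h t ih => simp [List.foldl_append, ih]

-- `none` is absorbing for B's fold.
theorem foldB_none (elements : List Int) (L : List Int) :
    L.foldl (pvStepB elements) none = none := by
  induction L with
  | nil => rfl
  | cons v L ih => simpa [pvStepB] using ih

-- Invariant of B's scan: starting from a pool whose members all come from
-- `elements`, the scan of L survives iff no value of `elements` occurs in L
-- more often than in the pool.
theorem foldB_isSome (elements : List Int) :
    ∀ (L pool : List Int), (∀ x, x ∉ elements → x ∉ pool) →
      ((L.foldl (pvStepB elements) (some pool)).isSome
        = decide (∀ x ∈ elements, L.count x ≤ pool.count x)) := by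
  intro L
  induction L with
  | nil => simp
  | cons v L ih =>
    intro pool hsub
    by_cases hvp : v ∈ pool
    · have hrem : PySem.List.remove? pool v = some (pool.erase v) :=
        PySem.List.remove?_eq_some_erase pool v hvp
      have hsub' : ∀ x, x ∉ elements → x ∉ pool.erase v := by
        intro x hx hm
        exact hsub x hx (List.mem_of_mem_erase hm)
      have hve : v ∈ elements := by
        by_contra hv
        exact hsub v hv hvp
      rw [List.foldl_cons]
      simp only [pvStepB, List.contains_eq_mem, hvp, decide_true, if_true, hrem,
        Option.getD_some]
      rw [ih (pool.erase v) hsub']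
      rw [decide_eq_decide]
      constructor
      · intro h x hx
        have := h x hx
        by_cases hxv : x = v
        · subst hxv
          rw [List.count_erase_self] at this
          have hc : 1 ≤ List.count x pool := List.one_le_count_iff.mpr hvp
          rw [List.count_cons_self]
          omega
        · rw [List.count_erase_of_ne hxv] at this
          rw [List.count_cons_of_ne (Ne.symm hxv)]
          exact this
      · intro h x hx
        have := h x hx
        by_cases hxv : x = v
        · subst hxv
          rw [List.count_cons_self] at this
          rw [List.count_erase_self]
          omega
        · rw [List.count_cons_of_ne (Ne.symm hxv)] at this
          rw [List.count_erase_of_ne hxv]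
          exact this
    · by_cases hve : v ∈ elements
      · rw [List.foldl_cons]
        have hstep : pvStepB elements (some pool) v = none := by
          simp [pvStepB, hvp, hve]
        rw [hstep, foldB_none]
        have hbad : ¬ (∀ x ∈ elements, (v :: L).count x ≤ pool.count x) := by
          intro h
          have := h v hve
          rw [List.count_cons_self] at this
          have : v ∈ pool := List.one_le_count_iff.mp (by omega)
          exact hvp this
        simp [hbad]
      · rw [List.foldl_cons]
        have hstep : pvStepB elements (some pool) v = some pool := by
          simp [pvStepB, hvp, hve]
        rw [hstep, ih pool hsub]
        rw [decide_eq_decide]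
        constructor
        · intro h x hx
          have hxv : x ≠ v := fun he => hve (he ▸ hx)
          rw [List.count_cons_of_ne (Ne.symm hxv)]
          exact h x hx
        · intro h x hx
          have hxv : x ≠ v := fun he => hve (he ▸ hx)
          have := h x hx
          rwa [List.count_cons_of_ne (Ne.symm hxv)] at this

-- ===== VERDICT (by name: the statement is the Claim_ definition above) =====
theorem equal_or_less_occurrences_spec : Claim_equal_equal_or_less_occurrences := by
  intro elements nested_tuple _
  unfold Spec_equal_or_less_occurrences
  unfold equal_or_less_occurrences equal_or_less_occurrences_alt
  rw [foldB_flatten, foldB_isSome elements nested_tuple.flatten elements (fun _ h => h)]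
  simp only [PySem.Dict.getD_counter, gt_iff_lt, Nat.cast_lt]
  by_cases hc : ∀ x ∈ elements, nested_tuple.flatten.count x ≤ elements.count x
  · rw [decide_eq_true hc, if_neg]
    simp only [List.any_eq_true, decide_eq_true_iff, not_exists, not_and, not_lt]
    exact hc
  · rw [decide_eq_false hc, if_pos]
    push Not at hc
    obtain ⟨x, hx, hlt⟩ := hc
    rw [List.any_eq_true]
    exact ⟨x, hx, decide_eq_true hlt⟩
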